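-- pv_equiv track=rewrite | github.com/Lab25A-CS/Appunti-Triennale | SecondoAnno/ASD/Modulo1/Algoritmi/Esercitazioni/strisciaDiMezzo.py | contaDestra
-- ===== SOURCE A (Python) =====
-- def contaDestra(L):
--     n = len(L) - 1
--     i, t = 0, 0
--     A = []
--
--     while i <= n:
--         if L[i] < 0:
--             break
--         A.append(None)
--         i += 1
--
--     while i <= n:
--         if L[i] < 0:
--             t = 0
--         else:
--             t += L[i]
--         A.append(t)
--         i += 1
--     return A
-- ===== SOURCE B (Python) =====
-- def contaDestra(L):
--     # Segment decomposition: the leading nonnegative run becomes a block of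
--     # Nones; each following segment starts at a negative (emit 0) and its
--     # nonnegative run gets unconditional prefix sums.
--     n = len(L)
--     k = 0
--     while k < n and L[k] >= 0:
--         k += 1
--     res = [None] * k
--     i = k
--     while i < n:
--         # L[i] < 0: one segment
--         res.append(0)
--         t = 0
--         j = i + 1
--         while j < n and L[j] >= 0:
--             t += L[j]
--             res.append(t)
--             j += 1
--         i = j
--     return res
-- ===== Notes on version B (the rewrite author's own statement) =====
-- stated objective: alternative
-- what changed: B is segment-based: it materializes the None-prefix as a block, then an outer loop walks segments delimited by negative elements, emitting 0 for the delimiter and unconditional prefix sums of the segment's nonnegative run in an inner loop, instead of A's single index scan carrying a running sum with a conditional reset.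
import Mathlib
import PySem

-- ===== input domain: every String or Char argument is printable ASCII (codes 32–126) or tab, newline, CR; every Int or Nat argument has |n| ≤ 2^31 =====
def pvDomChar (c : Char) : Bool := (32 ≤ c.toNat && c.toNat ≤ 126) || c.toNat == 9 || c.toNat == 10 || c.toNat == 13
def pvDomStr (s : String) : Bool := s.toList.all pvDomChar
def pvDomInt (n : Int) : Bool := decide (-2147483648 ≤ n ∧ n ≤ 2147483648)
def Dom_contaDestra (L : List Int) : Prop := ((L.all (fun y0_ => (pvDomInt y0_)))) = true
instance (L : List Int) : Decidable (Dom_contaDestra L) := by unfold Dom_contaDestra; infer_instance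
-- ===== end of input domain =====

-- B replaces A's single index scan with conditional reset by a segment decomposition:
-- a None block for the leading nonnegative run, then per segment a 0 for the delimiting
-- negative and unconditional prefix sums of its nonnegative run
-- (objective: alternative decomposition, same cost).

-- ===== PORT A =====
-- second while loop of A: running sum t, resetting on negatives, appending t each step
def contaDestraLoop2 (t : Int) : List Int → List (Option Int)
  | [] => []
  | x :: xs =>
    let t' := if x < 0 then 0 else t + x
    some t' :: contaDestraLoop2 t' xs

-- first while loop of A: append None until the first negative, then break into loop2
def contaDestraLoop1 : List Int → List (Option Int)
  | [] => []
  | x :: xs => if x < 0 then contaDestraLoop2 0 (x :: xs) else none :: contaDestraLoop1 xs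

def contaDestra (L : List Int) : List (Option Int) := contaDestraLoop1 L

-- ===== PORT B =====
-- the 'while ... >= 0' scans of B: length of the leading nonnegative run
def cdCountNonneg : List Int → Nat
  | [] => 0
  | x :: xs => if x ≥ 0 then cdCountNonneg xs + 1 else 0

-- B's inner while loop: unconditional prefix sums of a run
def cdAccum (t : Int) : List Int → List (Option Int)
  | [] => []
  | x :: xs => some (t + x) :: cdAccum (t + x) xs

-- B's outer while loop: one segment (delimiting negative, then its nonnegative run) per step
def cdSums : List Int → List (Option Int)
  | [] => []
  | _ :: xs =>
    let j := cdCountNonneg xs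
    (some 0 :: cdAccum 0 (xs.take j)) ++ cdSums (xs.drop j)
termination_by xs => xs.length
decreasing_by simp [List.length_drop]

def contaDestra_alt (L : List Int) : List (Option Int) :=
  let k := cdCountNonneg L
  List.replicate k (none : Option Int) ++ cdSums (L.drop k)

-- ===== PRECONDITION & SPEC =====
def Spec_contaDestra (L : List Int) (out : List (Option Int)) : Prop := out = contaDestra_alt L
instance (L : List Int) (out : List (Option Int)) : Decidable (Spec_contaDestra L out) := by unfold Spec_contaDestra; infer_instance

-- ===== CLAIM (what is proved, stated in full; the proofs are below) =====
def Claim_equal_contaDestra : Prop := ∀ (L : List Int), Dom_contaDestra L → Spec_contaDestra L (contaDestra L)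

-- ===== LEMMAS AND PROOFS =====

-- after dropping the leading nonnegative run, the list is empty or starts with a negative
theorem drop_cdCountNonneg (xs : List Int) :
    xs.drop (cdCountNonneg xs) = [] ∨ ∃ y ys, xs.drop (cdCountNonneg xs) = y :: ys ∧ y < 0 := by
  induction xs with
  | nil => left; rfl
  | cons x xs ih =>
    by_cases h : x ≥ 0
    · simpa [cdCountNonneg, h] using ih
    · right; exact ⟨x, xs, by simp [cdCountNonneg, h], by omega⟩

-- A's second loop splits at the leading nonnegative run; the carried sum at the
-- following negative (if any) is irrelevant since the loop resets there
theorem loop2_split (xs : List Int) (t t' : Int) :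
    contaDestraLoop2 t xs =
      cdAccum t (xs.take (cdCountNonneg xs)) ++ contaDestraLoop2 t' (xs.drop (cdCountNonneg xs)) := by
  induction xs generalizing t with
  | nil => simp [contaDestraLoop2, cdAccum]
  | cons x xs ih =>
    by_cases h : x ≥ 0
    · have hx : ¬ x < 0 := by omega
      simp only [cdCountNonneg, h, if_true, List.take_succ_cons, List.drop_succ_cons,
        contaDestraLoop2, hx, if_false, cdAccum, List.cons_append]
      exact congrArg _ (ih (t + x))
    · have hx : x < 0 := by omega
      simp [cdCountNonneg, h, contaDestraLoop2, hx, cdAccum]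

-- on a list that is empty or starts with a negative, B's segment loop is A's second loop
theorem cdSums_eq_loop2_aux (n : Nat) : ∀ (xs : List Int), xs.length ≤ n →
    (xs = [] ∨ ∃ y ys, xs = y :: ys ∧ y < 0) → cdSums xs = contaDestraLoop2 0 xs := by
  induction n with
  | zero =>
    intro xs hlen hx
    have : xs = [] := List.length_eq_zero_iff.mp (Nat.le_zero.mp hlen)
    subst this; simp [cdSums, contaDestraLoop2]
  | succ n ih =>
    intro xs hlen hx
    rcases hx with rfl | ⟨y, ys, rfl, hy⟩
    · simp [cdSums, contaDestraLoop2]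
    · have hylt : y < 0 := hy
      have hrec : cdSums (ys.drop (cdCountNonneg ys)) =
          contaDestraLoop2 0 (ys.drop (cdCountNonneg ys)) := by
        apply ih
        · have := List.length_drop (l := ys) (i := cdCountNonneg ys)
          have hl : ys.length ≤ n := by simpa using Nat.lt_succ_iff.mp (Nat.lt_of_lt_of_le (by simp) hlen)
          omega
        · exact drop_cdCountNonneg ys
      simp only [cdSums, contaDestraLoop2]
      simp only [show (y < 0) = True from by simp [hylt], if_true, List.cons_append]
      rw [hrec, ← loop2_split ys 0 0]

theorem cdSums_eq_loop2 (xs : List Int)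
    (hx : xs = [] ∨ ∃ y ys, xs = y :: ys ∧ y < 0) :
    cdSums xs = contaDestraLoop2 0 xs :=
  cdSums_eq_loop2_aux xs.length xs le_rfl hx

-- A's whole body equals B's whole body
theorem loop1_eq_alt (L : List Int) :
    contaDestraLoop1 L =
      List.replicate (cdCountNonneg L) (none : Option Int) ++ cdSums (L.drop (cdCountNonneg L)) := by
  induction L with
  | nil => simp [contaDestraLoop1, cdCountNonneg, cdSums]
  | cons x xs ih =>
    by_cases h : x ≥ 0
    · have hx : ¬ x < 0 := by omega
      simp [contaDestraLoop1, hx, cdCountNonneg, h, List.replicate_succ, ih]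
    · have hx : x < 0 := by omega
      simp only [cdCountNonneg, h, if_false, List.replicate, List.drop_zero, List.nil_append]
      rw [cdSums_eq_loop2 (x :: xs) (Or.inr ⟨x, xs, rfl, hx⟩)]
      simp [contaDestraLoop1, hx]

-- ===== VERDICT (by name: the statement is the Claim_ definition above) =====
theorem contaDestra_spec : Claim_equal_contaDestra := by
  intro L _
  show contaDestra L = contaDestra_alt L
  simpa [contaDestra, contaDestra_alt] using loop1_eq_alt L
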